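-- pv_equiv track=rewrite | github.com/gabrielaniceto1/problemas_em_python | script_codigos_c/c_similarity_fine_final.py | control_stream
-- ===== SOURCE A (Python) =====
-- def control_stream(tokens):
--     stream=[]
--     map_ctrl={'if':'IF','else':'ELSE','for':'FOR','while':'WHILE','do':'DO','switch':'SWITCH','case':'CASE','default':'DEFAULT',
--               'return':'RETURN','break':'BREAK','continue':'CONTINUE'}
--     for t in tokens:
--         tt=t.lower()
--         if tt in map_ctrl: stream.append(map_ctrl[tt])
--         elif t in {'{','}'}: stream.append('BRACE'+t)
--         elif t==';': stream.append('SEMI')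
--     comp=[]
--     for s in stream:
--         if not comp or comp[-1]!=s: comp.append(s)
--     return comp
-- ===== SOURCE B (Python) =====
-- def control_stream(tokens):
--     map_ctrl={'if':'IF','else':'ELSE','for':'FOR','while':'WHILE','do':'DO','switch':'SWITCH','case':'CASE','default':'DEFAULT',
--               'return':'RETURN','break':'BREAK','continue':'CONTINUE'}
--     rev=[]
--     for t in reversed(tokens):
--         s=map_ctrl.get(t.lower())
--         if s is None:
--             if t in ('{','}'):
--                 s='BRACE'+t
--             elif t==';':
--                 s='SEMI'
--             else:
--                 continue
--         if not rev or rev[-1]!=s: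
--             rev.append(s)
--     return list(reversed(rev))
-- ===== Notes on version B (the rewrite author's own statement) =====
-- stated objective: alternative
-- what changed: B traverses the tokens BACK-TO-FRONT in a single fused pass (mapping each token to its control symbol and collapsing duplicate runs against the last emitted symbol on the fly, never materialising A's intermediate stream list) and reverses the accumulator at the end; this is correct because collapsing runs of equal symbols commutes with list reversal.
import Mathlib
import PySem

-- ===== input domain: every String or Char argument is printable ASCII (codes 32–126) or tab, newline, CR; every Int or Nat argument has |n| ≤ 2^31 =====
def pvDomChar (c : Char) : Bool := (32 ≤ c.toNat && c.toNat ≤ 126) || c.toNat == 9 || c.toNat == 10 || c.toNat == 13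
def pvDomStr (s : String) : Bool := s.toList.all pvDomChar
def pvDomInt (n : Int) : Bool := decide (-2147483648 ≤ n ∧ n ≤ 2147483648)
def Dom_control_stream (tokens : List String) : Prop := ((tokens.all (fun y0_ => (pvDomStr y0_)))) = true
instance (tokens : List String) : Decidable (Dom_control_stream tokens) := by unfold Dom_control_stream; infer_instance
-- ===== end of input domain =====

-- B walks the token list BACK-TO-FRONT in one fused pass (no intermediate stream list) and
-- reverses the accumulator at the end; objective: alternative (collapsing runs commutes with reversal).

-- ===== PORT A =====
-- the map_ctrl dict literal of A (identical literal in B's source)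
def pvMapCtrl : PySem.Dict String String := PySem.Dict.ofList
  [("if", "IF"), ("else", "ELSE"), ("for", "FOR"), ("while", "WHILE"), ("do", "DO"),
   ("switch", "SWITCH"), ("case", "CASE"), ("default", "DEFAULT"),
   ("return", "RETURN"), ("break", "BREAK"), ("continue", "CONTINUE")]

def control_stream (tokens : List String) : List String :=
  let stream := tokens.foldl (fun stream t =>
    let tt := PySem.Str.lower t
    match pvMapCtrl.get? tt with          -- 'if tt in map_ctrl: … map_ctrl[tt]'
    | some v => stream ++ [v]
    | none =>
      if t = "{" ∨ t = "}" then stream ++ ["BRACE" ++ t]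
      else if t = ";" then stream ++ ["SEMI"]
      else stream) []
  stream.foldl (fun comp s =>
    if comp = [] ∨ PySem.List.pyGet? comp (-1) ≠ some s then comp ++ [s] else comp) []

-- ===== PORT B =====
-- 's = map_ctrl.get(t.lower())' and the branch chain that either fixes s or continues
def pvSym (t : String) : Option String :=
  match pvMapCtrl.get? (PySem.Str.lower t) with
  | some s => some s
  | none =>
    if t = "{" ∨ t = "}" then some ("BRACE" ++ t)
    else if t = ";" then some "SEMI"
    else none

def control_stream_alt (tokens : List String) : List String :=
  let rev := tokens.reverse.foldl (fun rev t =>   -- 'for t in reversed(tokens)'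
    match pvSym t with
    | none => rev                                 -- 'continue'
    | some s =>
      if rev = [] ∨ PySem.List.pyGet? rev (-1) ≠ some s then rev ++ [s] else rev) []
  rev.reverse                                     -- 'list(reversed(rev))'

-- ===== PRECONDITION & SPEC =====
def Spec_control_stream (tokens : List String) (out : List String) : Prop := out = control_stream_alt tokens
instance (tokens : List String) (out : List String) : Decidable (Spec_control_stream tokens out) := by unfold Spec_control_stream; infer_instance

-- ===== CLAIM (what is proved, stated in full; the proofs are below) =====
def Claim_equal_control_stream : Prop := ∀ (tokens : List String), Dom_control_stream tokens → Spec_control_stream tokens (control_stream tokens)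

-- ===== LEMMAS AND PROOFS =====

-- the common collapse step of both loops, named for the proofs
def pvStep (comp : List String) (s : String) : List String :=
  if comp = [] ∨ PySem.List.pyGet? comp (-1) ≠ some s then comp ++ [s] else comp

-- collapse with the last-emitted symbol as explicit state
def pvCR : List String → Option String → List String
  | [], _ => []
  | s :: l, last => if last = some s then pvCR l last else s :: pvCR l (some s)

-- head-recursive collapse of consecutive duplicates
def pvDD : List String → List String
  | [] => []
  | [a] => [a]
  | a :: b :: l => if a = b then pvDD (b :: l) else a :: pvDD (b :: l)

theorem pvStep_eq (comp : List String) (s : String) :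
    pvStep comp s = if comp.getLast? = some s then comp else comp ++ [s] := by
  unfold pvStep
  rw [PySem.List.pyGet?_neg_one]
  cases comp <;> simp

theorem pv_foldl_cr (l comp : List String) :
    l.foldl pvStep comp = comp ++ pvCR l comp.getLast? := by
  induction l generalizing comp with
  | nil => simp [pvCR]
  | cons s l ih =>
    rw [List.foldl_cons, pvStep_eq]
    by_cases h : comp.getLast? = some s
    · simp [pvCR, h, ih]
    · rw [if_neg h, ih, pvCR]
      simp [h]

theorem pv_cr_dd_cons (l : List String) (a : String) :
    a :: pvCR l (some a) = pvDD (a :: l) := by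
  induction l generalizing a with
  | nil => simp [pvCR, pvDD]
  | cons b l ih =>
    by_cases h : a = b
    · subst h; simp only [pvCR, pvDD]; exact ih a
    · simp only [pvCR, Option.some.injEq, if_neg h, pvDD, ← ih b]

theorem pv_cr_dd (l : List String) : pvCR l none = pvDD l := by
  cases l with
  | nil => rfl
  | cons a l => simp [pvCR, pv_cr_dd_cons]

theorem pv_dd_concat (l : List String) (x : String) :
    pvDD (l ++ [x]) = if l.getLast? = some x then pvDD l else pvDD l ++ [x] := by
  induction l using pvDD.induct with
  | case1 => simp [pvDD]
  | case2 b => by_cases h : b = x <;> simp [pvDD, h]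
  | case3 b l ih =>
    have e1 : ∀ y, pvDD (b :: b :: y) = pvDD (b :: y) := fun y => by simp [pvDD]
    simp only [List.cons_append, e1, List.getLast?_cons_cons]
    exact ih
  | case4 a b l h ih =>
    have e1 : ∀ y, pvDD (a :: b :: y) = a :: pvDD (b :: y) := fun y => by simp [pvDD, h]
    simp only [List.cons_append, e1, List.getLast?_cons_cons]
    simp only [List.cons_append] at ih
    rw [ih]
    split_ifs <;> simp

theorem pv_dd_reverse (l : List String) : pvDD l.reverse = (pvDD l).reverse := by
  induction l with
  | nil => rfl
  | cons a l ih =>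
    rw [List.reverse_cons, pv_dd_concat, List.getLast?_reverse]
    cases l with
    | nil => simp [pvDD]
    | cons b l' =>
      by_cases h : b = a
      · subst h
        rw [List.head?_cons, if_pos rfl, ih,
          show pvDD (b :: b :: l') = pvDD (b :: l') from by simp [pvDD]]
      · have h' : ¬ a = b := fun hh => h hh.symm
        rw [List.head?_cons, if_neg (by simp [h]), ih,
          show pvDD (a :: b :: l') = a :: pvDD (b :: l') from by simp [pvDD, h'],
          List.reverse_cons]

-- A's stream-building step appends exactly the symbol pvSym produces (or nothing)
theorem pv_stepA_eq (stream : List String) (t : String) :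
    (match pvMapCtrl.get? (PySem.Str.lower t) with
     | some v => stream ++ [v]
     | none =>
       if t = "{" ∨ t = "}" then stream ++ ["BRACE" ++ t]
       else if t = ";" then stream ++ ["SEMI"]
       else stream) = stream ++ (pvSym t).toList := by
  unfold pvSym
  cases h : pvMapCtrl.get? (PySem.Str.lower t) with
  | some v => simp
  | none => split_ifs <;> simp

-- A's first loop builds stream ++ filterMap pvSym tokens
theorem pv_streamA (tokens : List String) (stream : List String) :
    tokens.foldl (fun stream t =>
      match pvMapCtrl.get? (PySem.Str.lower t) with
      | some v => stream ++ [v]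
      | none =>
        if t = "{" ∨ t = "}" then stream ++ ["BRACE" ++ t]
        else if t = ";" then stream ++ ["SEMI"]
        else stream) stream = stream ++ tokens.filterMap pvSym := by
  induction tokens generalizing stream with
  | nil => simp
  | cons t ts ih =>
    rw [List.foldl_cons, pv_stepA_eq, ih]
    cases h : pvSym t <;> simp [h]

-- B's fused loop = collapse (pvStep-fold) of the filterMap'd symbol stream
theorem pv_fuse (tokens : List String) (comp : List String) :
    tokens.foldl (fun out t =>
        match pvSym t with
        | none => out
        | some s =>
          if out = [] ∨ PySem.List.pyGet? out (-1) ≠ some s then out ++ [s] else out) comp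
    = (tokens.filterMap pvSym).foldl pvStep comp := by
  induction tokens generalizing comp with
  | nil => rfl
  | cons t ts ih =>
    cases h : pvSym t <;> simp only [List.filterMap_cons, h, List.foldl_cons, ih, pvStep]

-- ===== VERDICT (by name: the statement is the Claim_ definition above) =====
theorem control_stream_spec : Claim_equal_control_stream := by
  intro tokens _
  unfold Spec_control_stream control_stream control_stream_alt
  rw [pv_streamA, pv_fuse, List.filterMap_reverse]
  show (List.filterMap pvSym tokens).foldl pvStep [] =
    (((List.filterMap pvSym tokens).reverse).foldl pvStep []).reverse
  rw [pv_foldl_cr, pv_foldl_cr]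
  simp only [List.nil_append, List.getLast?_nil, pv_cr_dd, pv_dd_reverse, List.reverse_reverse]
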